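-- pv_equiv track=rewrite | github.com/mbforbes/mapgen | src/py/graph.py | can_add_to_shortest
-- ===== SOURCE A (Python) =====
-- from typing import Dict, Set, Tuple, List, FrozenSet
--
-- def can_add_to_shortest(cur: int, curpath: List[int], shortest: Dict[int, List[List[int]]]) -> bool:
--     # if shortest hasn't found cur yet, then yes (because BFS finds shortest
--     # path lens)
--     if cur not in shortest:
--         return True
--
--     assert len(curpath) >= 2, 'algorithm expects paths to be >= 2 in len'
--
--     # if the path is just 2 (i.e., directly from start to this node), but a
--     # different path has already been added, then our graph construction is
--     # weird; that means we have multiple paths from the start to cur. let's not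
--     # add it for now.
--     if len(curpath) == 2:
--         return False
--
--     # now, for the interesting case. We want to add only if we've found a new
--     # path to this node that is unique; i.e., the middle nodes (excluding start
--     # and cur) have nothing in common with any other paths.
--     curpath_middle_nodes = set(curpath[1:-1])
--     for existing_path in shortest[cur]:
--         existing_path_middle_nodes = set(existing_path[1:-1])
--         if len(existing_path_middle_nodes.intersection(curpath_middle_nodes)) > 0:
--             return False
--     return True
-- ===== SOURCE B (Python) =====
-- from typing import Dict, List
--
-- def can_add_to_shortest(cur: int, curpath: List[int], shortest: Dict[int, List[List[int]]]) -> bool: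
--     if cur not in shortest:
--         return True
--     assert len(curpath) >= 2, 'algorithm expects paths to be >= 2 in len'
--     if len(curpath) == 2:
--         return False
--     # sort-then-merge: no sets at all; sort both middle-node sequences and
--     # detect a common element with a two-pointer merge scan.
--     xs = sorted(curpath[1:-1])
--     ys = sorted(x for p in shortest[cur] for x in p[1:-1])
--     i = j = 0
--     while i < len(xs) and j < len(ys):
--         if xs[i] == ys[j]:
--             return False
--         if xs[i] < ys[j]:
--             i += 1
--         else:
--             j += 1
--     return True
-- ===== Notes on version B (the rewrite author's own statement) =====
-- stated objective: alternative
-- what changed: Replaces A's hash-set intersections per existing path (with early return) by a sort-then-merge scheme: both middle-node sequences are sorted and a single two-pointer merge scan detects any common element, using no sets at all.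
import Mathlib
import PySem

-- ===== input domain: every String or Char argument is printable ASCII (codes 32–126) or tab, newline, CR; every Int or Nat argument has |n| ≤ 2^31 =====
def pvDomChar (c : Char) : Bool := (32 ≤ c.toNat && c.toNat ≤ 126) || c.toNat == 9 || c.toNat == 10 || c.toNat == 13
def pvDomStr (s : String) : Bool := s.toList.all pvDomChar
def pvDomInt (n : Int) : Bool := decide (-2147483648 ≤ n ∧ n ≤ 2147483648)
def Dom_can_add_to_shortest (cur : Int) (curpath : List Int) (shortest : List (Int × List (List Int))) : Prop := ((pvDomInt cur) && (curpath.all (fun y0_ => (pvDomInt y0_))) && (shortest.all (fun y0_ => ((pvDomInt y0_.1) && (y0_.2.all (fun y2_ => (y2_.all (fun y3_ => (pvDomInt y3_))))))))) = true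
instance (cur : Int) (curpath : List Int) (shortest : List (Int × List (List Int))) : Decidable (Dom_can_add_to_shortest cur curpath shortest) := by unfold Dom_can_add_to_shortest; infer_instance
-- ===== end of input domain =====

-- B replaces A's per-existing-path hash-set intersections by sort-then-merge:
-- both middle-node sequences are sorted and a two-pointer merge scan finds any
-- common element, with no sets at all (objective: alternative).

-- ===== PORT A =====
-- the for-loop over shortest[cur] with its early 'return False'
def pvGoA (curMid : PySem.Set Int) : List (List Int) → Bool
  | [] => true
  | p :: rest =>
    if 0 < PySem.Set.len (PySem.Set.inter (PySem.Set.ofList (PySem.List.slice p (some 1) (some (-1)))) curMid)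
    then false
    else pvGoA curMid rest

def can_add_to_shortest (cur : Int) (curpath : List Int) (shortest : List (Int × List (List Int))) : Bool :=
  match shortest.find? (fun kv => kv.1 == cur) with
  | none => true            -- cur not in shortest
  | some kv =>
    if curpath.length < 2 then false   -- Python: assert fails (AssertionError); excluded by Pre_
    else if curpath.length == 2 then false
    else
      pvGoA (PySem.Set.ofList (PySem.List.slice curpath (some 1) (some (-1)))) kv.2

-- ===== PORT B =====
-- the two-pointer merge scan over the two sorted lists
def pvMerge : List Int → List Int → Bool
  | _, [] => true
  | [], _ :: _ => true
  | x :: xs, y :: ys =>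
    if x == y then false
    else if x < y then pvMerge xs (y :: ys)
    else pvMerge (x :: xs) ys

def can_add_to_shortest_alt (cur : Int) (curpath : List Int) (shortest : List (Int × List (List Int))) : Bool :=
  match shortest.find? (fun kv => kv.1 == cur) with
  | none => true            -- cur not in shortest
  | some kv =>
    if curpath.length < 2 then false   -- Python: assert fails (AssertionError); excluded by Pre_
    else if curpath.length == 2 then false
    else
      let xs := PySem.List.sorted (PySem.List.slice curpath (some 1) (some (-1))) (fun x => x) false
      let ys := PySem.List.sorted (kv.2.flatMap (fun p => PySem.List.slice p (some 1) (some (-1)))) (fun x => x) false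
      pvMerge xs ys

-- ===== PRECONDITION & SPEC =====
-- Pre_ excludes exactly the inputs where the Python assert raises AssertionError:
-- cur present in shortest while len(curpath) < 2.
def Pre_can_add_to_shortest (cur : Int) (curpath : List Int) (shortest : List (Int × List (List Int))) : Prop :=
  shortest.any (fun kv => kv.1 == cur) = true → 2 ≤ curpath.length
instance (cur : Int) (curpath : List Int) (shortest : List (Int × List (List Int))) : Decidable (Pre_can_add_to_shortest cur curpath shortest) := by unfold Pre_can_add_to_shortest; infer_instance

def pvWitness_can_add_to_shortest : Int × List Int × (List (Int × List (List Int))) :=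
  (2, [0, 1, 2], [(2, [[0, 3, 2]])])

def Spec_can_add_to_shortest (cur : Int) (curpath : List Int) (shortest : List (Int × List (List Int))) (out : Bool) : Prop := out = can_add_to_shortest_alt cur curpath shortest
instance (cur : Int) (curpath : List Int) (shortest : List (Int × List (List Int))) (out : Bool) : Decidable (Spec_can_add_to_shortest cur curpath shortest out) := by unfold Spec_can_add_to_shortest; infer_instance

-- ===== CLAIM (what is proved, stated in full; the proofs are below) =====
def Claim_equal_can_add_to_shortest : Prop := ∀ (cur : Int) (curpath : List Int) (shortest : List (Int × List (List Int))), Dom_can_add_to_shortest cur curpath shortest → Pre_can_add_to_shortest cur curpath shortest → Spec_can_add_to_shortest cur curpath shortest (can_add_to_shortest cur curpath shortest)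

-- ===== LEMMAS AND PROOFS =====

theorem pvLenPos (t : PySem.Set Int) : (0 < PySem.Set.len t) ↔ ∃ x, x ∈ t := by
  simp [PySem.Set.len, List.length_pos_iff_exists_mem]

-- A's loop returns true iff no existing path's middle meets curMid
theorem pvGoA_true_iff (m : PySem.Set Int) (ps : List (List Int)) :
    pvGoA m ps = true ↔
      ∀ p ∈ ps, ∀ x ∈ PySem.List.slice p (some 1) (some (-1)), x ∉ m := by
  induction ps with
  | nil => simp [pvGoA]
  | cons p rest ih =>
    simp only [pvGoA]
    split_ifs with h
    · rw [pvLenPos] at h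
      obtain ⟨x, hx⟩ := h
      rw [PySem.Set.mem_inter] at hx
      simp only [false_iff, not_forall]
      refine ⟨p, by simp, x, ?_, ?_⟩
      · exact (PySem.Set.mem_ofList _ _).1 hx.1
      · simp [hx.2]
    · rw [ih]
      constructor
      · intro hall q hq x hxq
        rcases List.mem_cons.1 hq with rfl | hq'
        · intro hxm
          exact h ((pvLenPos _).2
            ⟨x, (PySem.Set.mem_inter _ _ _).2 ⟨(PySem.Set.mem_ofList _ _).2 hxq, hxm⟩⟩)
        · exact hall q hq' x hxq
      · intro hall q hq x hxq
        exact hall q (List.mem_cons_of_mem _ hq) x hxq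

-- B's merge scan on two (≤-)sorted lists returns true iff the lists are disjoint
theorem pvMerge_true_iff (xs ys : List Int)
    (hx : xs.Pairwise (· ≤ ·)) (hy : ys.Pairwise (· ≤ ·)) :
    pvMerge xs ys = true ↔ ∀ a ∈ xs, a ∉ ys := by
  induction xs generalizing ys with
  | nil => cases ys <;> simp [pvMerge]
  | cons x xs ihx =>
    induction ys with
    | nil => simp [pvMerge]
    | cons y ys ihy =>
      rw [List.pairwise_cons] at hx hy
      simp only [pvMerge]
      split_ifs with heq hlt
      · simp only [beq_iff_eq] at heq
        subst heq
        simp only [false_iff, not_forall]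
        exact ⟨x, by simp, by simp⟩
      · -- x < y : x is below every element of y :: ys
        have hne : ¬ x = y := by simpa using heq
        rw [ihx (y :: ys) hx.2 (List.pairwise_cons.2 hy)]
        constructor
        · intro h a ha
          rcases List.mem_cons.1 ha with ha' | ha'
          · subst ha'
            intro hmem
            rcases List.mem_cons.1 hmem with hm | hm
            · exact hne hm
            · exact absurd (hy.1 _ hm) (not_le.2 hlt)
          · exact h a ha'
        · intro h a ha
          exact h a (List.mem_cons_of_mem _ ha)
      · -- y < x : y is below every element of x :: xs
        have hne : ¬ x = y := by simpa using heq
        have hyx : y < x := by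
          rcases lt_trichotomy x y with h1 | h1 | h1
          · exact absurd h1 hlt
          · exact absurd h1 hne
          · exact h1
        rw [ihy hy.2]
        constructor
        · intro h a ha hmem
          rcases List.mem_cons.1 hmem with hm | hm
          · subst hm
            rcases List.mem_cons.1 ha with hb | hb
            · exact hne hb.symm
            · exact absurd (hx.1 _ hb) (not_le.2 hyx)
          · exact h a ha hm
        · intro h a ha hmem
          exact (h a ha) (List.mem_cons_of_mem _ hmem)

-- ===== VERDICT (by name: the statement is the Claim_ definition above) =====
theorem can_add_to_shortest_spec : Claim_equal_can_add_to_shortest := by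
  intro cur curpath shortest _ _
  unfold Spec_can_add_to_shortest can_add_to_shortest can_add_to_shortest_alt
  cases h : shortest.find? (fun kv => kv.1 == cur) with
  | none => rfl
  | some kv =>
    simp only
    split_ifs with h1 h2
    · rfl
    · rfl
    · rw [Bool.eq_iff_iff, pvGoA_true_iff,
        pvMerge_true_iff _ _ (PySem.List.sorted_pairwise _ _) (PySem.List.sorted_pairwise _ _)]
      simp only [PySem.List.mem_sorted, List.mem_flatMap, PySem.Set.mem_ofList]
      constructor
      · intro hh a ha ⟨p, hp, hap⟩
        exact hh p hp a hap ha
      · intro hh p hp x hxp hxm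
        exact hh x hxm ⟨p, hp, hxp⟩
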